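-- pv_equiv track=rewrite | github.com/abingeorge07/EC551_ProgrammingAssignments | ProgrammingAssignment1/PrimeImplicants.py | covers2
-- ===== SOURCE A (Python) =====
-- def covers2(minterm, prime_implicant):
--     numberX_min = minterm.count('-')
--     numberX_PI = prime_implicant.count('-')
--     minimumX = min([numberX_min, numberX_PI])
--     checkSum = 0
--     for i in range(0, len(minterm)):
--         if(minterm[i] == '-' and prime_implicant[i] == '-'):
--             checkSum = checkSum + 1
--         if((minterm[i] != '-' and prime_implicant[i] != '-' and minterm[i] != prime_implicant[i]) or (prime_implicant[i] == 'x' or minterm[i] == 'x')):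
--             return False
--     if(checkSum == minimumX):
--         return True
--     else:
--         return False
-- ===== SOURCE B (Python) =====
-- def covers2(minterm, prime_implicant):
--     n = len(minterm)
--     dashes_min = {i for i in range(n) if minterm[i] == '-'}
--     dashes_pi = {i for i in range(n) if prime_implicant[i] == '-'}
--     if any(prime_implicant[i] == 'x' or minterm[i] == 'x'
--            or (i not in dashes_min and i not in dashes_pi
--                and minterm[i] != prime_implicant[i])
--            for i in range(n)):
--         return False
--     minimumX = min(minterm.count('-'), prime_implicant.count('-'))
--     return len(dashes_min & dashes_pi) == minimumX
-- ===== Notes on version B (the rewrite author's own statement) =====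
-- stated objective: alternative
-- what changed: Replaces the single accumulator loop (running checkSum with early return) by set comprehensions: build the sets of dash positions of both strings, reject via any() over the conflict condition, and compare the size of the set intersection against the min of the full dash counts.
-- outside the precondition, e.g. on covers2('x0', 'x'): A returns False, B raises IndexError
import Mathlib
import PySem

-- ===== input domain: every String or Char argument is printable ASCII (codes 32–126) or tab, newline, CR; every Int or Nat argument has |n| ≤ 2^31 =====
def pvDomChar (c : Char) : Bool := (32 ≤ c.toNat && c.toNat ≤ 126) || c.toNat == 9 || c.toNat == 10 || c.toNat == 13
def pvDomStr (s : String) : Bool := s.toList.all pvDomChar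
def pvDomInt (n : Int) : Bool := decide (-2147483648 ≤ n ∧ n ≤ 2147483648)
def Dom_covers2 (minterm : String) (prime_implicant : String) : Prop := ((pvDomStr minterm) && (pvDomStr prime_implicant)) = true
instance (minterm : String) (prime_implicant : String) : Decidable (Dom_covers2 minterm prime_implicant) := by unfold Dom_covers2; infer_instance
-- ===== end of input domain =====

-- B replaces A's accumulator loop by dash-position sets, an any() conflict test and a set-intersection size; alternative decomposition, same cost.


-- ===== PORT A =====
-- A's for-loop: index i, running checkSum; `none` from pyGet? = Python IndexError (outside Pre_)
def covers2Loop (m p : List Char) (minimumX : Int) (i : Nat) (checkSum : Int) : Bool :=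
  if _h : i < m.length then
    match PySem.List.pyGet? m (i : Int), PySem.List.pyGet? p (i : Int) with
    | some mc, some pc =>
      let checkSum' := if mc = '-' ∧ pc = '-' then checkSum + 1 else checkSum
      if (mc ≠ '-' ∧ pc ≠ '-' ∧ mc ≠ pc) ∨ (pc = 'x' ∨ mc = 'x') then false
      else covers2Loop m p minimumX (i + 1) checkSum'
    | _, _ => false   -- IndexError; unreachable under Pre_
  else decide (checkSum = minimumX)
  termination_by m.length - i

def covers2 (minterm : String) (prime_implicant : String) : Bool :=
  let numberX_min : Int := (PySem.Str.count minterm "-" : Int)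
  let numberX_PI : Int := (PySem.Str.count prime_implicant "-" : Int)
  let minimumX : Int := min numberX_min numberX_PI
  covers2Loop minterm.toList prime_implicant.toList minimumX 0 0

-- ===== PORT B =====
def covers2_alt (minterm : String) (prime_implicant : String) : Bool :=
  let m := minterm.toList
  let p := prime_implicant.toList
  let n := m.length
  let dashesMin : PySem.Set Nat :=
    PySem.Set.ofList ((List.range n).filter (fun i => PySem.List.pyGet? m (i : Int) == some '-'))
  let dashesPi : PySem.Set Nat :=
    PySem.Set.ofList ((List.range n).filter (fun i => PySem.List.pyGet? p (i : Int) == some '-'))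
  if (List.range n).any (fun i =>
       PySem.List.pyGet? p (i : Int) == some 'x' || PySem.List.pyGet? m (i : Int) == some 'x' ||
       (!(PySem.Set.contains dashesMin i) && !(PySem.Set.contains dashesPi i) &&
        PySem.List.pyGet? m (i : Int) != PySem.List.pyGet? p (i : Int)))
  then false
  else
    let minimumX : Int := min (PySem.Str.count minterm "-" : Int) (PySem.Str.count prime_implicant "-" : Int)
    decide (((PySem.Set.inter dashesMin dashesPi).length : Int) = minimumX)

-- ===== PRECONDITION & SPEC =====
-- Pre_ excludes prime implicants shorter than the minterm: there A raises IndexError except when an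
-- earlier conflicting position makes it return False first; B's set comprehensions raise IndexError on all of them.
def Pre_covers2 (minterm : String) (prime_implicant : String) : Prop :=
  minterm.toList.length ≤ prime_implicant.toList.length
instance (minterm : String) (prime_implicant : String) : Decidable (Pre_covers2 minterm prime_implicant) := by
  unfold Pre_covers2; infer_instance
def pvWitness_covers2 : String × String := ("1-0", "1--")

def Spec_covers2 (minterm : String) (prime_implicant : String) (out : Bool) : Prop := out = covers2_alt minterm prime_implicant
instance (minterm : String) (prime_implicant : String) (out : Bool) : Decidable (Spec_covers2 minterm prime_implicant out) := by unfold Spec_covers2; infer_instance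

-- ===== CLAIM (what is proved, stated in full; the proofs are below) =====
def Claim_equal_covers2 : Prop := ∀ (minterm : String) (prime_implicant : String), Dom_covers2 minterm prime_implicant → Pre_covers2 minterm prime_implicant → Spec_covers2 minterm prime_implicant (covers2 minterm prime_implicant)

-- ===== LEMMAS AND PROOFS =====

-- the conflict test of position i, common characterisation of both ports' early-False condition
def pvBad (m p : List Char) (i : Nat) : Bool :=
  decide ((m.getD i ' ' ≠ '-' ∧ p.getD i ' ' ≠ '-' ∧ m.getD i ' ' ≠ p.getD i ' ') ∨
          (p.getD i ' ' = 'x' ∨ m.getD i ' ' = 'x'))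

-- position i carries a dash in both strings
def pvBoth (m p : List Char) (i : Nat) : Bool :=
  decide (m.getD i ' ' = '-' ∧ p.getD i ' ' = '-')

theorem covers2Loop_char (m p : List Char) (X : Int) (hlen : m.length ≤ p.length) :
    ∀ k i checkSum, i + k = m.length →
    covers2Loop m p X i checkSum =
      if (List.range' i k).any (pvBad m p) then false
      else decide (checkSum + ((List.range' i k).countP (pvBoth m p) : Int) = X) := by
  intro k
  induction k with
  | zero =>
    intro i cs hi
    rw [covers2Loop]
    simp [show ¬ (i < m.length) by omega]
  | succ k ih =>
    intro i cs hi
    have him : i < m.length := by omega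
    have hip : i < p.length := by omega
    rw [covers2Loop]
    rw [dif_pos him]
    rw [PySem.List.pyGet?_natCast, PySem.List.pyGet?_natCast,
        List.getElem?_eq_getElem him, List.getElem?_eq_getElem hip]
    simp only [List.range'_succ, List.any_cons, List.countP_cons]
    have hbad : pvBad m p i = decide ((m[i] ≠ '-' ∧ p[i] ≠ '-' ∧ m[i] ≠ p[i]) ∨ (p[i] = 'x' ∨ m[i] = 'x')) := by
      simp [pvBad, him, hip]
    have hboth : pvBoth m p i = decide (m[i] = '-' ∧ p[i] = '-') := by
      simp [pvBoth, him, hip]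
    by_cases hb : (m[i] ≠ '-' ∧ p[i] ≠ '-' ∧ m[i] ≠ p[i]) ∨ (p[i] = 'x' ∨ m[i] = 'x')
    · simp [hb, hbad]
    · rw [if_neg hb]
      rw [ih (i+1) _ (by omega)]
      by_cases hany : (List.range' (i+1) k).any (pvBad m p)
      · simp [hany, hbad, hb]
      · by_cases h2 : m[i] = '-' ∧ p[i] = '-'
        · simp only [hany, if_false, hbad, hboth, hb, decide_false,
                     Bool.false_or, if_pos h2, Bool.false_eq_true]
          rw [decide_eq_decide]
          simp only [h2.1, h2.2, and_self, decide_true, if_true]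
          push_cast
          omega
        · simp only [hany, if_false, hbad, hboth, hb, decide_false,
                     Bool.false_or, if_neg h2, Bool.false_eq_true]
          rw [decide_eq_decide]
          simp only [h2, decide_false, if_false]
          push_cast
          omega

theorem pvAnyCongr {α : Type} (l : List α) (f g : α → Bool) (h : ∀ x ∈ l, f x = g x) :
    l.any f = l.any g := by
  induction l with
  | nil => rfl
  | cons a t ih =>
    simp only [List.any_cons, h a (List.mem_cons_self), ih (fun x hx => h x (List.mem_cons_of_mem _ hx))]

theorem covers2_alt_char (minterm prime_implicant : String)
    (hpre : minterm.toList.length ≤ prime_implicant.toList.length) :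
    covers2_alt minterm prime_implicant =
      (if (List.range minterm.toList.length).any (pvBad minterm.toList prime_implicant.toList) then false
       else decide ((((List.range minterm.toList.length).countP (pvBoth minterm.toList prime_implicant.toList)) : Int)
              = min (PySem.Str.count minterm "-" : Int) (PySem.Str.count prime_implicant "-" : Int))) := by
  simp only [covers2_alt]
  set m := minterm.toList with hmdef
  set p := prime_implicant.toList with hpdef
  set n := m.length with hndef
  have hget : ∀ i, i < n → PySem.List.pyGet? m (i : Int) = some (m.getD i ' ') ∧ PySem.List.pyGet? p (i : Int) = some (p.getD i ' ') := by
    intro i hi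
    have hip : i < p.length := by omega
    have h1 : m[i]? = some m[i] := List.getElem?_eq_getElem hi
    have h2 : p[i]? = some p[i] := List.getElem?_eq_getElem hip
    constructor <;> simp [PySem.List.pyGet?_natCast, List.getD_eq_getElem?_getD, h1, h2]
  have hdm : PySem.Set.ofList ((List.range n).filter (fun i : Nat => PySem.List.pyGet? m (i : Int) == some '-'))
      = (List.range n).filter (fun i : Nat => PySem.List.pyGet? m (i : Int) == some '-') :=
    PySem.Set.ofList_eq_self_of_nodup _ (List.Nodup.filter _ (List.nodup_range))
  have hdp : PySem.Set.ofList ((List.range n).filter (fun i : Nat => PySem.List.pyGet? p (i : Int) == some '-'))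
      = (List.range n).filter (fun i : Nat => PySem.List.pyGet? p (i : Int) == some '-') :=
    PySem.Set.ofList_eq_self_of_nodup _ (List.Nodup.filter _ (List.nodup_range))
  rw [hdm, hdp]
  -- contains on the two filtered index lists
  have hcm : ∀ i, i < n →
      PySem.Set.contains ((List.range n).filter (fun i : Nat => PySem.List.pyGet? m (i : Int) == some '-')) i
        = decide (m.getD i ' ' = '-') := by
    intro i hi
    have := (hget i hi).1
    simp only [PySem.Set.contains_eq_listContains]
    simp [List.mem_filter, List.mem_range, hi, this, List.getD_eq_getElem?_getD,
      List.getElem?_eq_getElem (show i < m.length by omega), List.getElem!_eq_getElem?_getD]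
  have hcp : ∀ i, i < n →
      PySem.Set.contains ((List.range n).filter (fun i : Nat => PySem.List.pyGet? p (i : Int) == some '-')) i
        = decide (p.getD i ' ' = '-') := by
    intro i hi
    have := (hget i hi).2
    have hip : i < p.length := by omega
    simp only [PySem.Set.contains_eq_listContains]
    simp [List.mem_filter, List.mem_range, hi, this, List.getD_eq_getElem?_getD,
      List.getElem?_eq_getElem hip, List.getElem!_eq_getElem?_getD]
  -- the any() test equals pvBad pointwise
  have hany : (List.range n).any (fun i =>
       PySem.List.pyGet? p (i : Int) == some 'x' || PySem.List.pyGet? m (i : Int) == some 'x' ||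
       (!(PySem.Set.contains ((List.range n).filter (fun i : Nat => PySem.List.pyGet? m (i : Int) == some '-')) i) &&
        !(PySem.Set.contains ((List.range n).filter (fun i : Nat => PySem.List.pyGet? p (i : Int) == some '-')) i) &&
        PySem.List.pyGet? m (i : Int) != PySem.List.pyGet? p (i : Int)))
      = (List.range n).any (pvBad m p) := by
    apply pvAnyCongr
    intro i hi
    rw [List.mem_range] at hi
    have hip : i < p.length := by omega
    rw [hcm i hi, hcp i hi, (hget i hi).1, (hget i hi).2]
    simp only [pvBad, List.getD_eq_getElem?_getD]
    by_cases h1 : m[i]?.getD ' ' = '-' <;> by_cases h2 : p[i]?.getD ' ' = '-' <;>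
      by_cases h3 : m[i]?.getD ' ' = 'x' <;> by_cases h4 : p[i]?.getD ' ' = 'x' <;>
      by_cases h5 : m[i]?.getD ' ' = p[i]?.getD ' ' <;>
      simp [h1, h2, h3, h4, h5]
  rw [hany]
  -- the intersection length equals the countP
  have hinter :
      ((PySem.Set.inter
          ((List.range n).filter (fun i : Nat => PySem.List.pyGet? m (i : Int) == some '-'))
          ((List.range n).filter (fun i : Nat => PySem.List.pyGet? p (i : Int) == some '-'))).length : Int)
        = ((List.range n).countP (pvBoth m p) : Int) := by
    congr 1
    have : PySem.Set.inter
          ((List.range n).filter (fun i : Nat => PySem.List.pyGet? m (i : Int) == some '-'))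
          ((List.range n).filter (fun i : Nat => PySem.List.pyGet? p (i : Int) == some '-'))
        = ((List.range n).filter (fun i : Nat => PySem.List.pyGet? m (i : Int) == some '-')).filter
            (fun i => ((List.range n).filter (fun j : Nat => PySem.List.pyGet? p (j : Int) == some '-')).contains i) := by
      simp [PySem.Set.inter]
    rw [this, List.filter_filter, List.countP_eq_length_filter]
    congr 1
    apply List.filter_congr
    intro i hi
    rw [List.mem_range] at hi
    have hip : i < p.length := by omega
    have hcp' := hcp i hi
    simp only [PySem.Set.contains_eq_listContains] at hcp'
    rw [hcp', (hget i hi).1]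
    simp only [pvBoth, List.getD_eq_getElem?_getD]
    by_cases h1 : m[i]?.getD ' ' = '-' <;> by_cases h2 : p[i]?.getD ' ' = '-' <;> simp [h1, h2]
  rw [hinter]

-- ===== VERDICT (by name: the statement is the Claim_ definition above) =====
theorem covers2_spec : Claim_equal_covers2 := by
  intro minterm prime_implicant _hdom hpre
  unfold Spec_covers2
  unfold Pre_covers2 at hpre
  simp only [covers2]
  rw [covers2Loop_char minterm.toList prime_implicant.toList _ hpre minterm.toList.length 0 0 (by omega)]
  rw [← List.range_eq_range']
  rw [covers2_alt_char minterm prime_implicant hpre]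
  simp
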